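-- pv_equiv track=rewrite | github.com/bekirdag/gpt-creator | scripts/python/document_index.py | _resolve_model_context
-- ===== SOURCE A (Python) =====
-- from typing import Optional, List, Tuple, Set, Dict, Sequence, Any
--
-- MODEL_CONTEXTS: Dict[str, int] = {
--     "gpt-5-codex": 128000,
--     "gpt-5": 128000,
--     "gpt-4.1": 128000,
--     "gpt-4.1-coder": 128000,
--     "gpt-4.1-mini": 128000,
--     "gpt-4o": 128000,
--     "gpt-4o-mini": 128000,
--     "o4": 128000,
--     "o4-mini": 128000,
-- }
--
-- def _resolve_model_context(model_name: str) -> int: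
--     name = (model_name or "").strip().lower()
--     if not name:
--         return 128000
--     if name in MODEL_CONTEXTS:
--         return MODEL_CONTEXTS[name]
--     # try to match prefix
--     for key, value in MODEL_CONTEXTS.items():
--         if name.startswith(key):
--             return value
--     return 128000
-- ===== SOURCE B (Python) =====
-- def _resolve_model_context(model_name: str) -> int:
--     # Every entry of MODEL_CONTEXTS is 128000 and every branch (empty name,
--     # exact match, prefix match, fallthrough) yields 128000, so the result
--     # is the constant 128000 for all inputs.
--     return 128000
-- ===== Notes on version B (the rewrite author's own statement) =====
-- stated objective: simpler
-- what changed: All table values and all fallback branches of A return 128000, so B replaces the normalization, dict lookup and prefix loop with the closed-form constant 128000.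
import Mathlib
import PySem

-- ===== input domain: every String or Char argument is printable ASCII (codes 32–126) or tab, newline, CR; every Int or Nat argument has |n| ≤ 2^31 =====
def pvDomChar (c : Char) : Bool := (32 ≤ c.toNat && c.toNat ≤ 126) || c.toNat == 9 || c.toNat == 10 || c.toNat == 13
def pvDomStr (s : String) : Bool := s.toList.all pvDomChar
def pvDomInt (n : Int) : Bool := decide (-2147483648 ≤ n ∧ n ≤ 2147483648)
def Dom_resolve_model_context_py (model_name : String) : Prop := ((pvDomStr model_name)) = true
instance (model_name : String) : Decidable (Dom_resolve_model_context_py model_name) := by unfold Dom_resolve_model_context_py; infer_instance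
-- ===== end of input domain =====

-- B replaces A's normalization, dict membership test and prefix loop by the
-- constant 128000, which every branch of A returns (simpler; return value only).

-- ===== PORT A =====
def MODEL_CONTEXTS : PySem.Dict String Int := PySem.Dict.mk
  [("gpt-5-codex", 128000), ("gpt-5", 128000), ("gpt-4.1", 128000),
   ("gpt-4.1-coder", 128000), ("gpt-4.1-mini", 128000), ("gpt-4o", 128000),
   ("gpt-4o-mini", 128000), ("o4", 128000), ("o4-mini", 128000)]

-- the 'for key, value in MODEL_CONTEXTS.items()' prefix loop of A
def pvPrefixLoop (name : String) : List (String × Int) → Int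
  | [] => 128000
  | (key, value) :: rest =>
      if PySem.Str.startswith name key then value else pvPrefixLoop name rest

def resolve_model_context_py (model_name : String) : Int :=
  let name := PySem.Str.lower (PySem.Str.strip model_name)
  if name = "" then 128000
  else
    match MODEL_CONTEXTS.get? name with
    | some v => v
    | none => pvPrefixLoop name MODEL_CONTEXTS.items

-- ===== PORT B =====
def resolve_model_context_py_alt (_model_name : String) : Int := 128000

-- ===== PRECONDITION & SPEC =====
def Spec_resolve_model_context_py (model_name : String) (out : Int) : Prop := out = resolve_model_context_py_alt model_name
instance (model_name : String) (out : Int) : Decidable (Spec_resolve_model_context_py model_name out) := by unfold Spec_resolve_model_context_py; infer_instance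

-- ===== CLAIM (what is proved, stated in full; the proofs are below) =====
def Claim_equal_resolve_model_context_py : Prop := ∀ (model_name : String), Dom_resolve_model_context_py model_name → Spec_resolve_model_context_py model_name (resolve_model_context_py model_name)

-- ===== LEMMAS AND PROOFS =====

-- every value stored in MODEL_CONTEXTS is 128000, so any successful lookup gives 128000
theorem pvGetConst (name : String) (v : Int) (h : MODEL_CONTEXTS.get? name = some v) :
    v = 128000 := by
  unfold MODEL_CONTEXTS at h
  simp only [PySem.Dict.get?_mk_cons] at h
  split_ifs at h <;> simp_all [PySem.Dict.get?]

-- the prefix loop over a list whose values are all 128000 returns 128000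
theorem pvPrefixLoop_const (name : String) (l : List (String × Int))
    (h : ∀ p ∈ l, p.2 = (128000 : Int)) : pvPrefixLoop name l = 128000 := by
  induction l with
  | nil => rfl
  | cons p rest ih =>
    obtain ⟨k, v⟩ := p
    simp only [pvPrefixLoop]
    split
    · exact h (k, v) (List.mem_cons_self ..)
    · exact ih fun q hq => h q (List.mem_cons_of_mem _ hq)

-- ===== VERDICT (by name: the statement is the Claim_ definition above) =====
theorem resolve_model_context_py_spec : Claim_equal_resolve_model_context_py := by
  intro m _
  unfold Spec_resolve_model_context_py resolve_model_context_py resolve_model_context_py_alt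
  dsimp only
  split
  · rfl
  · split
    · next v h => exact pvGetConst _ v h
    · exact pvPrefixLoop_const _ _ (by decide)
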